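-- pv_equiv track=rewrite | github.com/attendfov/att_ctc_tf2 | transformer/Encoder.py | get_reverse_points
-- ===== SOURCE A (Python) =====
-- def get_reverse_points(points):
--     ret_points = []
--     for point in points:
--         pointx, pointy = point
--         anchor_xcent = 4 * pointx + 2
--         anchor_xsoff = max(anchor_xcent - 4, 0)
--         anchor_xeoff = max(anchor_xcent + 4, 0)
--
--         anchor_ycent = 16 * pointy + 8
--         anchor_ysoff = max(anchor_ycent - 16, 0)
--         anchor_yeoff = max(anchor_ycent + 16, 0)
--
--         positions = []
--         for anchory_off in range(anchor_ysoff, anchor_yeoff):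
--             if int(anchory_off / 16.0) != pointy:
--                 continue
--             for anchorx_off in range(anchor_xsoff, anchor_xeoff):
--                 if int(anchorx_off / 4.0) == pointx:
--                     positions.append([int(anchorx_off), int(anchory_off)])
--         ret_points.append(positions)
--     return ret_points
-- ===== SOURCE B (Python) =====
-- def get_reverse_points(points):
--     # Closed-form: the offsets surviving A's filters are exactly the product
--     # range [4*px, 4*px+4) x [16*py, 16*py+16), empty for negative coordinates.
--     return [
--         [[x, y] for y in range(16 * py, 16 * py + 16)
--                 for x in range(4 * px, 4 * px + 4)]
--         if px >= 0 and py >= 0 else []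
--         for px, py in points
--     ]
-- ===== Notes on version B (the rewrite author's own statement) =====
-- stated objective: simpler
-- what changed: Replaces the scan-and-filter over padded anchor windows (with float-division membership tests) by directly generating the product of the two closed-form offset intervals [4*px,4*px+4) x [16*py,16*py+16), empty when a coordinate is negative.
import Mathlib
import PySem

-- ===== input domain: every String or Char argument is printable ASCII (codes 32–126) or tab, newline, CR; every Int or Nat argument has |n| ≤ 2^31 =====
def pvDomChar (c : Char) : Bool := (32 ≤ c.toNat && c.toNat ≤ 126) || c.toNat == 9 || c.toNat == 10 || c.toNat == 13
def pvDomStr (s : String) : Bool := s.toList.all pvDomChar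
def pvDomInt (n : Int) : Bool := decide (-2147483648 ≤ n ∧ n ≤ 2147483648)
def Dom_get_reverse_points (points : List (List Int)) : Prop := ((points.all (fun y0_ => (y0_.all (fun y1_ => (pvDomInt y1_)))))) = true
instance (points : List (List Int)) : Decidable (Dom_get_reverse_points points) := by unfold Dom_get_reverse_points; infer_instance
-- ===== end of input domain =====

-- B replaces A's scan-and-filter over padded anchor windows by directly generating the
-- two closed-form offset ranges (objective: simpler); equal wherever each inner point list
-- has exactly two coordinates (Pre_), since Python's tuple unpacking raises otherwise.


-- ===== PORT A =====
-- int(off / 16.0) and int(off / 4.0) are ported as PySem.Int.truncdiv; exact here because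
-- all offsets have magnitude below 2^53 on the stated domain.
def get_reverse_points (points : List (List Int)) : List (List (List Int)) :=
  points.foldl (fun ret_points point =>
    match point with
    | [pointx, pointy] =>
      let anchor_xcent := 4 * pointx + 2
      let anchor_xsoff := max (anchor_xcent - 4) 0
      let anchor_xeoff := max (anchor_xcent + 4) 0
      let anchor_ycent := 16 * pointy + 8
      let anchor_ysoff := max (anchor_ycent - 16) 0
      let anchor_yeoff := max (anchor_ycent + 16) 0
      let positions := (PySem.List.pyRange anchor_ysoff anchor_yeoff 1).foldl
        (fun positions anchory_off =>
          if PySem.Int.truncdiv anchory_off 16 ≠ pointy then positions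
          else (PySem.List.pyRange anchor_xsoff anchor_xeoff 1).foldl
            (fun positions anchorx_off =>
              if PySem.Int.truncdiv anchorx_off 4 = pointx then
                positions ++ [[anchorx_off, anchory_off]]
              else positions) positions) []
      ret_points ++ [positions]
    | _ => ret_points) []   -- unreachable under Pre_ (Python unpacking raises there)

-- ===== PORT B =====
-- per-point body of B's comprehension
-- 'for px, py in points' is read as px = point[0], py = point[1]; on lists of length ≠ 2
-- Python raises instead (outside Pre_), so the defaults below are never observed there.
def altPositions (point : List Int) : List (List Int) :=
  let px := PySem.List.pyGetD point 0 0
  let py := PySem.List.pyGetD point 1 0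
  if 0 ≤ px ∧ 0 ≤ py then
    (PySem.List.pyRange (16 * py) (16 * py + 16) 1).flatMap (fun y =>
      (PySem.List.pyRange (4 * px) (4 * px + 4) 1).map (fun x => [x, y]))
  else []

def get_reverse_points_alt (points : List (List Int)) : List (List (List Int)) :=
  points.map altPositions

-- ===== PRECONDITION & SPEC =====
-- Pre_ excludes inner lists whose length is not 2: Python's 'pointx, pointy = point' raises ValueError there.
def Pre_get_reverse_points (points : List (List Int)) : Prop :=
  ∀ p ∈ points, p.length = 2
instance (points : List (List Int)) : Decidable (Pre_get_reverse_points points) := by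
  unfold Pre_get_reverse_points; infer_instance
def pvWitness_get_reverse_points : List (List Int) := [[0, 0], [2, 1]]
def Spec_get_reverse_points (points : List (List Int)) (out : List (List (List Int))) : Prop := out = get_reverse_points_alt points
instance (points : List (List Int)) (out : List (List (List Int))) : Decidable (Spec_get_reverse_points points out) := by unfold Spec_get_reverse_points; infer_instance

-- ===== CLAIM (what is proved, stated in full; the proofs are below) =====
def Claim_equal_get_reverse_points : Prop := ∀ (points : List (List Int)), Dom_get_reverse_points points → Pre_get_reverse_points points → Spec_get_reverse_points points (get_reverse_points points)

-- ===== LEMMAS AND PROOFS =====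

-- A filter of a unit-step range by a predicate that (on the range) describes the
-- interval [lo, hi) is the clipped range.
lemma filter_pyRange_interval (p : Int → Bool) (lo hi : Int) :
    ∀ (n : Nat) (a b : Int), (b - a).toNat = n →
      (∀ x, a ≤ x → (p x = true ↔ lo ≤ x ∧ x < hi)) →
      (PySem.List.pyRange a b 1).filter p = PySem.List.pyRange (max lo a) (min hi b) 1 := by
  intro n
  induction n with
  | zero =>
    intro a b hn hp
    have hba : b ≤ a := by omega
    rw [PySem.List.pyRange_one_eq_nil hba, PySem.List.pyRange_one_eq_nil (by omega)]
    rfl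
  | succ m ih =>
    intro a b hn hp
    have hab : a < b := by omega
    rw [PySem.List.pyRange_one_cons hab, List.filter_cons]
    by_cases hpa : p a = true
    · have hia := (hp a le_rfl).mp hpa
      rw [if_pos hpa, ih (a + 1) b (by omega) (fun x hx => hp x (by omega))]
      have h1 : max lo (a + 1) = a + 1 := by omega
      have h2 : max lo a = a := by omega
      rw [h1, h2]
      exact (PySem.List.pyRange_one_cons (by omega : a < min hi b)).symm
    · have hia : ¬ (lo ≤ a ∧ a < hi) := fun h => hpa ((hp a le_rfl).mpr h)
      rw [if_neg hpa, ih (a + 1) b (by omega) (fun x hx => hp x (by omega))]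
      by_cases hlo : a < lo
      · have : max lo (a + 1) = max lo a := by omega
        rw [this]
      · -- a ≥ hi here, both ranges empty
        have hhi : hi ≤ a := by omega
        rw [PySem.List.pyRange_one_eq_nil (by omega), PySem.List.pyRange_one_eq_nil (by omega)]

-- the truncating divisions really are interval membership tests on nonnegative offsets
lemma trunc16_char (py a : Int) (ha : 0 ≤ a) :
    ∀ x, a ≤ x → ((decide (PySem.Int.truncdiv x 16 = py)) = true ↔ 16 * py ≤ x ∧ x < 16 * py + 16) := by
  intro x hx
  have hx0 : 0 ≤ x := by omega
  simp only [PySem.Int.truncdiv, Int.tdiv_eq_ediv_of_nonneg hx0, decide_eq_true_eq]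
  omega

lemma trunc4_char (px a : Int) (ha : 0 ≤ a) :
    ∀ x, a ≤ x → ((decide (PySem.Int.truncdiv x 4 = px)) = true ↔ 4 * px ≤ x ∧ x < 4 * px + 4) := by
  intro x hx
  have hx0 : 0 ≤ x := by omega
  simp only [PySem.Int.truncdiv, Int.tdiv_eq_ediv_of_nonneg hx0, decide_eq_true_eq]
  omega

-- the per-point computation of A equals the per-point computation of B
lemma point_eq (pointx pointy : Int) :
    (PySem.List.pyRange (max (16 * pointy + 8 - 16) 0) (max (16 * pointy + 8 + 16) 0) 1).foldl
      (fun positions anchory_off =>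
        if PySem.Int.truncdiv anchory_off 16 ≠ pointy then positions
        else (PySem.List.pyRange (max (4 * pointx + 2 - 4) 0) (max (4 * pointx + 2 + 4) 0) 1).foldl
          (fun positions anchorx_off =>
            if PySem.Int.truncdiv anchorx_off 4 = pointx then
              positions ++ [[anchorx_off, anchory_off]]
            else positions) positions) []
    = if 0 ≤ pointx ∧ 0 ≤ pointy then
        (PySem.List.pyRange (16 * pointy) (16 * pointy + 16) 1).flatMap (fun y =>
          (PySem.List.pyRange (4 * pointx) (4 * pointx + 4) 1).map (fun x => [x, y]))
      else [] := by
  -- inner x-loop is an append of the filtered, mapped x-range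
  have hx : (PySem.List.pyRange (max (4 * pointx + 2 - 4) 0) (max (4 * pointx + 2 + 4) 0) 1).filter
        (fun x => decide (PySem.Int.truncdiv x 4 = pointx))
      = PySem.List.pyRange (max (4 * pointx) (max (4 * pointx + 2 - 4) 0))
          (min (4 * pointx + 4) (max (4 * pointx + 2 + 4) 0)) 1 :=
    filter_pyRange_interval _ _ _ _ _ _ rfl (trunc4_char pointx _ (by omega))
  have hy : (PySem.List.pyRange (max (16 * pointy + 8 - 16) 0) (max (16 * pointy + 8 + 16) 0) 1).filter
        (fun y => decide (PySem.Int.truncdiv y 16 = pointy))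
      = PySem.List.pyRange (max (16 * pointy) (max (16 * pointy + 8 - 16) 0))
          (min (16 * pointy + 16) (max (16 * pointy + 8 + 16) 0)) 1 :=
    filter_pyRange_interval _ _ _ _ _ _ rfl (trunc16_char pointy _ (by omega))
  calc
    _ = ((PySem.List.pyRange (max (16 * pointy + 8 - 16) 0) (max (16 * pointy + 8 + 16) 0) 1).filter
          (fun y => decide (PySem.Int.truncdiv y 16 = pointy))).flatMap (fun anchory_off =>
            ((PySem.List.pyRange (max (4 * pointx + 2 - 4) 0) (max (4 * pointx + 2 + 4) 0) 1).filter
              (fun x => decide (PySem.Int.truncdiv x 4 = pointx))).map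
                (fun anchorx_off => [anchorx_off, anchory_off])) := by
        simp only [ne_eq, ite_not, PySem.List.foldl_ite_eq_foldl_filter,
          PySem.List.foldl_append_eq_flatMap, List.nil_append]
        exact List.flatMap_congr (fun y _ => List.map_eq_flatMap.symm)
    _ = _ := by
        rw [hx, hy]
        by_cases h : 0 ≤ pointx ∧ 0 ≤ pointy
        · rw [if_pos h]
          obtain ⟨hpx, hpy⟩ := h
          have e1 : max (16 * pointy) (max (16 * pointy + 8 - 16) 0) = 16 * pointy := by omega
          have e2 : min (16 * pointy + 16) (max (16 * pointy + 8 + 16) 0) = 16 * pointy + 16 := by omega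
          have e3 : max (4 * pointx) (max (4 * pointx + 2 - 4) 0) = 4 * pointx := by omega
          have e4 : min (4 * pointx + 4) (max (4 * pointx + 2 + 4) 0) = 4 * pointx + 4 := by omega
          rw [e1, e2, e3, e4]
        · rw [if_neg h]
          rcases not_and_or.mp h with hpx | hpy
          · -- x-range is empty, so every flatMap element is []
            rw [PySem.List.pyRange_one_eq_nil (a := max (4 * pointx)
                (max (4 * pointx + 2 - 4) 0)) (by omega)]
            simp
          · -- y-range is empty
            rw [PySem.List.pyRange_one_eq_nil (a := max (16 * pointy)
                (max (16 * pointy + 8 - 16) 0)) (by omega)]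
            simp

lemma foldl_points (l : List (List Int)) (hl : ∀ p ∈ l, p.length = 2) :
    ∀ acc, l.foldl (fun ret_points point =>
      match point with
      | [pointx, pointy] =>
        ret_points ++ [(PySem.List.pyRange (max (16 * pointy + 8 - 16) 0)
            (max (16 * pointy + 8 + 16) 0) 1).foldl
          (fun positions anchory_off =>
            if PySem.Int.truncdiv anchory_off 16 ≠ pointy then positions
            else (PySem.List.pyRange (max (4 * pointx + 2 - 4) 0)
                (max (4 * pointx + 2 + 4) 0) 1).foldl
              (fun positions anchorx_off =>
                if PySem.Int.truncdiv anchorx_off 4 = pointx then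
                  positions ++ [[anchorx_off, anchory_off]]
                else positions) positions) []]
      | _ => ret_points) acc
    = acc ++ l.map altPositions := by
  induction l with
  | nil => intro acc; simp
  | cons p rest ih =>
    intro acc
    match p, hl p List.mem_cons_self with
    | [px, py], _ =>
      simp only [List.foldl_cons, List.map_cons]
      rw [ih (fun q hq => hl q (List.mem_cons_of_mem _ hq)), point_eq]
      simp [altPositions, PySem.List.pyGetD, PySem.List.pyGet?, PySem.List.pyIdx?]


-- ===== VERDICT (by name: the statement is the Claim_ definition above) =====
theorem get_reverse_points_spec : Claim_equal_get_reverse_points := by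
  intro points _ hpre
  show get_reverse_points points = get_reverse_points_alt points
  unfold get_reverse_points get_reverse_points_alt
  rw [foldl_points points hpre []]
  rfl
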